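-- pv_equiv track=rewrite | github.com/2k23ece2312029-boop/Mission-DSA | Hacker rank/Priyankaandtoys.py | toys
-- ===== SOURCE A (Python) =====
-- def toys(w):
--     """
--     Calculates the minimum number of containers required for the given toy weights.
--
--     Args:
--         w: A list of integers representing the weights of the toys.
--
--     Returns:
--         An integer representing the minimum number of containers.
--     """
--     w.sort()  # Sort the weights in ascending order
--
--     if not w:  # Handle the case of an empty list
--         return 0
--
--     containers = 1
--     current_max_weight = w[0] + 4  # Max weight for the first container
--
--     for i in range(1, len(w)):
--         if w[i] > current_max_weight:
--             containers += 1
--             current_max_weight = w[i] + 4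
--
--     return containers
-- ===== SOURCE B (Python) =====
-- def toys(w):
--     """Minimum number of containers: repeatedly remove the min and all weights within +4 of it.
--     (A sorts w in place; this version does not mutate w — equivalence is about the return value.)"""
--     containers = 0
--     remaining = w
--     while remaining:
--         limit = min(remaining) + 4
--         remaining = [x for x in remaining if x > limit]
--         containers += 1
--     return containers
-- ===== Notes on version B (the rewrite author's own statement) =====
-- stated objective: alternative
-- what changed: Replaces sort-then-linear-greedy-scan by an unsorted staged algorithm: repeatedly take min(remaining) and filter out all weights within +4 of it, counting one container per round (no sort, no running max; B does not mutate w).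
import Mathlib
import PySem

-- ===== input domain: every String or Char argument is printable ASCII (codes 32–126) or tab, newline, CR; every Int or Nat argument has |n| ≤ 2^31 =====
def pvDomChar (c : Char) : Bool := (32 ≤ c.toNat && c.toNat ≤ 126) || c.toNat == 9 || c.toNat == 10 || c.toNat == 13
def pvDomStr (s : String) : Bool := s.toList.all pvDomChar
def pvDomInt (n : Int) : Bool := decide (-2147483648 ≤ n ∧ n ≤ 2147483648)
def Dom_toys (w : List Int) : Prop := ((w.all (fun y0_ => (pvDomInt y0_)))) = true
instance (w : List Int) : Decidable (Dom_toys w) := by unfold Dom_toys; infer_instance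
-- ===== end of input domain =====

-- B replaces A's sort-then-running-max scan by an unsorted staged algorithm (repeated min + filter);
-- A sorts its argument in place, B does not mutate it — the equivalence proved is about the return value.

-- ===== PORT A =====
-- sort, then fold over the tail with state (containers, current_max_weight)
def toys (w : List Int) : Int :=
  let s := PySem.List.sorted w (fun x => x)
  match s with
  | [] => 0
  | a :: rest =>
      (rest.foldl (fun (st : Int × Int) x =>
        if x > st.2 then (st.1 + 1, x + 4) else st) (1, a + 4)).1

-- ===== PORT B =====
-- while remaining: limit = min(remaining) + 4; remaining = [x for x in remaining if x > limit]; containers += 1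
def toysLoop (remaining : List Int) (containers : Int) : Int :=
  if h : remaining = [] then containers
  else
    let m := (PySem.List.min? remaining (fun x => x)).getD 0
    toysLoop (remaining.filter (fun x => m + 4 < x)) (containers + 1)
termination_by remaining.length
decreasing_by
  obtain ⟨m', hm⟩ : ∃ m', PySem.List.min? remaining (fun x => x) = some m' := by
    rcases hme : PySem.List.min? remaining (fun x => x) with _ | m'
    · exact absurd ((PySem.List.min?_eq_none_iff remaining (fun x => x)).mp hme) h
    · exact ⟨m', rfl⟩
  have hmem := PySem.List.min?_mem hm
  simp only [hm, Option.getD_some, List.length_unattach]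
  rw [← List.length_attach (l := remaining)]
  exact List.length_filter_lt_length_iff_exists.mpr ⟨⟨m', hmem⟩, List.mem_attach _ _, by simp⟩

def toys_alt (w : List Int) : Int := toysLoop w 0

-- ===== PRECONDITION & SPEC =====
def Spec_toys (w : List Int) (out : Int) : Prop := out = toys_alt w
instance (w : List Int) (out : Int) : Decidable (Spec_toys w out) := by unfold Spec_toys; infer_instance

-- ===== CLAIM (what is proved, stated in full; the proofs are below) =====
def Claim_equal_toys : Prop := ∀ (w : List Int), Dom_toys w → Spec_toys w (toys w)

-- ===== LEMMAS AND PROOFS =====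

-- proof-side characterisation of the group count on a sorted list
def toysGroups (l : List Int) : Int :=
  match l with
  | [] => 0
  | a :: rest => 1 + toysGroups (rest.dropWhile (fun x => x ≤ a + 4))
termination_by l.length
decreasing_by
  exact Nat.lt_succ_of_le (List.length_dropWhile_le _ _)

theorem toysGroups_cons (a : Int) (rest : List Int) :
    toysGroups (a :: rest) = 1 + toysGroups (rest.dropWhile (fun x => x ≤ a + 4)) := by
  rw [toysGroups]

-- A's fold from state (c, m) adds exactly the groups of the elements still above m.
theorem foldl_eq_groups (l : List Int) (c m : Int) :
    (l.foldl (fun (st : Int × Int) x =>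
      if x > st.2 then (st.1 + 1, x + 4) else st) (c, m)).1
    = c + toysGroups (l.dropWhile (fun x => x ≤ m)) := by
  induction l generalizing c m with
  | nil => simp [toysGroups]
  | cons x l ih =>
      by_cases h : x ≤ m
      · have hx : ¬ x > m := not_lt.mpr h
        simp [List.foldl, hx, List.dropWhile, h, ih]
      · have hx : x > m := lt_of_not_ge h
        have hd : (x :: l).dropWhile (fun y => decide (y ≤ m)) = x :: l := by
          simp [List.dropWhile, h]
        simp only [List.foldl, if_pos hx]
        rw [ih, hd, toysGroups_cons]
        ring

-- on an ascending list, filtering for (k < ·) is dropping the prefix of (· ≤ k)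
theorem filter_eq_dropWhile_of_sorted (k : Int) (l : List Int)
    (hs : l.Pairwise (· ≤ ·)) :
    l.filter (fun x => k < x) = l.dropWhile (fun x => x ≤ k) := by
  induction l with
  | nil => rfl
  | cons x t ih =>
      rcases List.pairwise_cons.mp hs with ⟨hx, ht⟩
      by_cases h : x ≤ k
      · simp [List.filter, List.dropWhile, h, not_lt.mpr h, ih ht]
      · have hk : k < x := lt_of_not_ge h
        have hall : ∀ y ∈ t, k < y := fun y hy => lt_of_lt_of_le hk (hx y hy)
        rw [List.filter_cons_of_pos (by simpa using hk),
          List.dropWhile_cons_of_neg (by simpa using hk),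
          List.filter_eq_self.mpr (fun y hy => decide_eq_true (hall y hy))]

-- B's loop from count c adds exactly the groups of sorted(l).
theorem toysLoop_eq_groups (l : List Int) (c : Int) :
    toysLoop l c = c + toysGroups (PySem.List.sorted l (fun x => x)) := by
  induction hn : l.length using Nat.strong_induction_on generalizing l c with
  | _ n ih =>
    by_cases hl : l = []
    · subst hl
      unfold toysLoop
      simp [PySem.List.sorted, toysGroups]
    · obtain ⟨m, hm⟩ : ∃ m, PySem.List.min? l (fun x => x) = some m := by
        rcases hme : PySem.List.min? l (fun x => x) with _ | m'
        · exact absurd ((PySem.List.min?_eq_none_iff l (fun x => x)).mp hme) hl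
        · exact ⟨m', rfl⟩
      have hmem := PySem.List.min?_mem hm
      have hmin := PySem.List.min?_isMin hm
      -- sorted l is nonempty with head equal to m
      obtain ⟨a, rest, hsr⟩ : ∃ a rest, PySem.List.sorted l (fun x => x) = a :: rest := by
        cases hs : PySem.List.sorted l (fun x => x) with
        | nil => exact absurd ((PySem.List.sorted_eq_nil_iff l (fun x => x) false).mp hs) hl
        | cons a rest => exact ⟨a, rest, rfl⟩
      have ham : a = m := by
        have h1 : a ≤ m := PySem.List.key_head_sorted_le l (fun x => x) hsr m hmem
        have h2 : m ≤ a :=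
          hmin a ((PySem.List.mem_sorted l (fun x => x) false a).mp
            (hsr ▸ List.mem_cons_self))
        exact le_antisymm h1 h2
      -- the filtered remainder is exactly the dropped tail of sorted l
      have hperm : (l.filter (fun x => m + 4 < x)).Perm
          ((a :: rest).filter (fun x => m + 4 < x)) :=
        (List.Perm.filter _ (hsr ▸ (PySem.List.sorted_perm l (fun x => x) false))).symm
      have hpw : (a :: rest).Pairwise (· ≤ ·) := by
        have := PySem.List.sorted_pairwise l (fun x => x)
        rwa [hsr] at this
      have hfa : (a :: rest).filter (fun x => m + 4 < x)
          = rest.dropWhile (fun x => x ≤ a + 4) := by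
        have hrest : rest.Pairwise (· ≤ ·) := (List.pairwise_cons.mp hpw).2
        have hna : ¬ (m + 4 < a) := by omega
        rw [List.filter_cons_of_neg (by simpa using hna),
          filter_eq_dropWhile_of_sorted (m + 4) rest hrest, ham]
      have hsorted_filter : PySem.List.sorted (l.filter (fun x => m + 4 < x)) (fun x => x)
          = rest.dropWhile (fun x => x ≤ a + 4) := by
        apply PySem.List.sorted_id_eq_of_perm_of_pairwise
        · exact (hfa ▸ hperm).symm
        · exact (hfa ▸ (List.Pairwise.filter _ hpw) :)
      have hlen : (l.filter (fun x => m + 4 < x)).length < n := by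
        subst hn
        exact List.length_filter_lt_length_iff_exists.mpr ⟨m, hmem, by simp⟩
      rw [toysLoop]
      rw [dif_neg hl]
      simp only [hm, Option.getD_some]
      rw [ih _ hlen _ (c + 1) rfl, hsorted_filter, hsr, toysGroups_cons]
      ring

-- ===== VERDICT (by name: the statement is the Claim_ definition above) =====
theorem toys_spec : Claim_equal_toys := by
  intro w _
  unfold Spec_toys toys toys_alt
  rw [toysLoop_eq_groups]
  cases h : PySem.List.sorted w (fun x => x) with
  | nil => simp [toysGroups]
  | cons a rest =>
      simp only []
      rw [foldl_eq_groups, toysGroups_cons]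
      ring
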